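-- pv_equiv track=rewrite | github.com/kmina02/Algorithm | 프로그래머스/3/42579. 베스트앨범/베스트앨범.py | solution
-- ===== SOURCE A (Python) =====
-- def solution(genres, plays):
--     music_count = {}
--     answer = []
--     for i in range(len(genres)):
--         if genres[i] not in music_count:
--             music_count[genres[i]] = 0
--         music_count[genres[i]] += plays[i]
--     genres_sorted = sorted(music_count.items(), key = lambda x: x[1], reverse = True)
--
--     # 장르별 고유 번호와 재생 횟수를 담은 딕셔너리 music 생성
--     music = {}
--     for genre in genres_sorted:
--         music[genre[0]] = []
--     for i in range(len(genres)):
--         g, p = genres[i], plays[i]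
--         music[g].append([i, p])
--
--     # 장르 내에서 많이 재생된 노래를 먼저 수록
--     answer.extend([x[0] for music_info in music.values() for x in sorted(music_info, key=lambda x: (-x[1], x[0]))[:2]])
--
--
--     return answer
-- ===== SOURCE B (Python) =====
-- def solution(genres, plays):
--     # one global sort with a composite key instead of a genre sort plus per-genre sorts
--     total = {}
--     rank = {}
--     for i in range(len(genres)):
--         g = genres[i]
--         if g not in rank:
--             rank[g] = len(rank)
--             total[g] = 0
--         total[g] += plays[i]
--     order = sorted(range(len(genres)),
--                    key=lambda i: (-total[genres[i]], rank[genres[i]], -plays[i], i))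
--     emitted = {}
--     answer = []
--     for i in order:
--         g = genres[i]
--         c = emitted.get(g, 0)
--         if c < 2:
--             emitted[g] = c + 1
--             answer.append(i)
--     return answer
-- ===== Notes on version B (the rewrite author's own statement) =====
-- stated objective: alternative
-- what changed: B replaces A's two dicts plus a stable genre sort followed by a separate sort inside every genre with one global sort of all song indices under a composite lexicographic key (-genre_total, genre_first_appearance_rank, -plays, index) and a single linear counting pass that emits at most two songs per genre.
import Mathlib
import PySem

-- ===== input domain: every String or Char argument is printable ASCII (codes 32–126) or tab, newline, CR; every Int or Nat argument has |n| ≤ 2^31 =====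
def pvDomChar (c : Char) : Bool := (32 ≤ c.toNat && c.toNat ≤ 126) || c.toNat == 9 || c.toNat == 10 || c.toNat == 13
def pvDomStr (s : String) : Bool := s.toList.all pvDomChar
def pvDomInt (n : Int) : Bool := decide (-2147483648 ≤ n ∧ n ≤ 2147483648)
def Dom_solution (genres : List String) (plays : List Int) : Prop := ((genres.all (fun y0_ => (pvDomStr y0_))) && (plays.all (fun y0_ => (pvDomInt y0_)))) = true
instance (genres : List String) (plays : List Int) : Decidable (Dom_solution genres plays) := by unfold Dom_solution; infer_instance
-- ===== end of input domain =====

-- B replaces A's per-genre sorts by ONE global sort of all song indices under a composite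
-- lexicographic key plus a linear counting pass (objective: alternative decomposition).

-- ===== PORT A =====
def solution (genres : List String) (plays : List Int) : List Int :=
  let musicCount : PySem.Dict String Int :=
    (PySem.List.pyRange 0 (genres.length : Int)).foldl (fun d i =>
      let g := PySem.List.pyGetD genres i ""
      let d := if d.contains g then d else d.insert g 0
      d.insert g (d.getD g 0 + PySem.List.pyGetD plays i 0)) PySem.Dict.empty
  let genresSorted := PySem.List.sorted musicCount.items (fun x => x.2) true
  let music0 : PySem.Dict String (List (Int × Int)) :=
    genresSorted.foldl (fun d genre => d.insert genre.1 ([] : List (Int × Int))) PySem.Dict.empty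
  let music :=
    (PySem.List.pyRange 0 (genres.length : Int)).foldl (fun d i =>
      let g := PySem.List.pyGetD genres i ""
      let p := PySem.List.pyGetD plays i 0
      d.modify g [] (fun l => l ++ [(i, p)])) music0
  music.values.flatMap (fun info =>
    (PySem.List.slice (PySem.List.sorted info (fun x => toLex (-x.2, x.1))) none (some 2)).map
      (fun x => x.1))

-- ===== PORT B =====
def solution_alt (genres : List String) (plays : List Int) : List Int :=
  let st :=
    (PySem.List.pyRange 0 (genres.length : Int)).foldl
      (fun (st : PySem.Dict String Int × PySem.Dict String Int) i =>
        let g := PySem.List.pyGetD genres i ""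
        let st := if st.2.contains g then st
                  else (st.1.insert g 0, st.2.insert g (st.2.size : Int))
        (st.1.modify g 0 (· + PySem.List.pyGetD plays i 0), st.2))
      (PySem.Dict.empty, PySem.Dict.empty)
  let order := PySem.List.sorted (PySem.List.pyRange 0 (genres.length : Int))
      (fun i =>
        let g := PySem.List.pyGetD genres i ""
        toLex (-(st.1.getD g 0),
          toLex (st.2.getD g 0, toLex (-(PySem.List.pyGetD plays i 0), i))))
  (order.foldl
    (fun (st : PySem.Dict String Int × List Int) i =>
      let g := PySem.List.pyGetD genres i ""
      let c := st.1.getD g 0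
      if c < 2 then (st.1.insert g (c + 1), st.2 ++ [i]) else st)
    (PySem.Dict.empty, [])).2

-- ===== PRECONDITION & SPEC =====
-- A raises IndexError (plays[i]) when plays is shorter than genres; Pre_ excludes exactly those inputs.
def Pre_solution (genres : List String) (plays : List Int) : Prop :=
  genres.length ≤ plays.length
instance (genres : List String) (plays : List Int) : Decidable (Pre_solution genres plays) := by
  unfold Pre_solution; infer_instance

def pvWitness_solution : List String × List Int := (["pop", "rock", "pop"], [500, 600, 150])

def Spec_solution (genres : List String) (plays : List Int) (out : List Int) : Prop := out = solution_alt genres plays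
instance (genres : List String) (plays : List Int) (out : List Int) : Decidable (Spec_solution genres plays out) := by unfold Spec_solution; infer_instance

-- ===== CLAIM (what is proved, stated in full; the proofs are below) =====
def Claim_equal_solution : Prop := ∀ (genres : List String) (plays : List Int), Dom_solution genres plays → Pre_solution genres plays → Spec_solution genres plays (solution genres plays)

-- ===== LEMMAS AND PROOFS =====

-- Short names for the common pieces of both programs.
def gAt (genres : List String) (i : Int) : String := PySem.List.pyGetD genres i ""
def pAt (plays : List Int) (i : Int) : Int := PySem.List.pyGetD plays i 0
def idxL (genres : List String) : List Int := PySem.List.pyRange 0 (genres.length : Int)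
def gde (genres : List String) : List String := PySem.List.dedup genres
def totP (genres : List String) (plays : List Int) (g : String) : Int :=
  (((idxL genres).filter (fun i => gAt genres i == g)).map (pAt plays)).sum
def rnkP (genres : List String) (g : String) : Int := (List.idxOf g (gde genres) : Int)
def songsP (genres : List String) (plays : List Int) (g : String) : List (Int × Int) :=
  ((idxL genres).filter (fun i => gAt genres i == g)).map (fun i => (i, pAt plays i))
def keyS : Int × Int → Lex (Int × Int) := fun x => toLex (-x.2, x.1)
def keyGP (genres : List String) (plays : List Int) (g : String) : Lex (Int × Int) :=
  toLex (-(totP genres plays g), rnkP genres g)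
def itemsP (genres : List String) (plays : List Int) : List (String × Int) :=
  (gde genres).map (fun g => (g, totP genres plays g))
def GS (genres : List String) (plays : List Int) : List (String × Int) :=
  PySem.List.sorted (itemsP genres plays) (fun x => keyGP genres plays x.1)
def ordG (genres : List String) (plays : List Int) : List String := (GS genres plays).map (fun x => x.1)
def sIdx (genres : List String) (plays : List Int) (g : String) : List Int :=
  (PySem.List.sorted (songsP genres plays g) keyS).map (fun x => x.1)
def RES (genres : List String) (plays : List Int) : List Int :=
  (ordG genres plays).flatMap (fun g => (sIdx genres plays g).take 2)


-- ---------- generic facts ----------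

theorem map_gAt_idxL (genres : List String) : (idxL genres).map (gAt genres) = genres := by
  simpa [idxL, gAt] using PySem.List.map_pyGetD_pyRange_zero genres ""

-- the strict "stable reverse sort" order: key descending, position ascending on ties
def Rst {α : Type} (key pos : α → Int) (a b : α) : Prop :=
  key b < key a ∨ (key b = key a ∧ pos a < pos b)

theorem insertBy_perm {α : Type} (bef : α → α → Bool) (x : α) (acc : List α) :
    (PySem.List.insertBy bef x acc).Perm (x :: acc) := by
  induction acc with
  | nil => simp [PySem.List.insertBy]
  | cons y ys ih =>
      simp only [PySem.List.insertBy]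
      split
      · exact List.Perm.refl _
      · exact (ih.cons y).trans (List.Perm.swap x y ys)

theorem insertBy_pairwise {α : Type} (key pos : α → Int) (x : α) (acc : List α)
    (hacc : acc.Pairwise (Rst key pos)) (hpos : ∀ y ∈ acc, pos y < pos x) :
    (PySem.List.insertBy (fun a b => decide (key b < key a)) x acc).Pairwise (Rst key pos) := by
  induction acc with
  | nil => simp [PySem.List.insertBy, Rst]
  | cons y ys ih =>
      rcases List.pairwise_cons.mp hacc with ⟨hy, hys⟩
      simp only [PySem.List.insertBy]
      split
      · rename_i hlt
        have hxy : key y < key x := by simpa using hlt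
        refine List.pairwise_cons.mpr ⟨?_, hacc⟩
        intro z hz
        rcases List.mem_cons.mp hz with rfl | hz
        · exact Or.inl hxy
        · rcases hy z hz with h | ⟨h1, _⟩
          · exact Or.inl (lt_trans h hxy)
          · exact Or.inl (h1 ▸ hxy)
      · rename_i hnlt
        have hxy : ¬ key y < key x := by simpa using hnlt
        refine List.pairwise_cons.mpr ⟨?_, ih hys (fun z hz => hpos z (List.mem_cons_of_mem _ hz))⟩
        intro z hz
        have hz' : z = x ∨ z ∈ ys := by
          have := (insertBy_perm (fun a b => decide (key b < key a)) x ys).mem_iff.mp hz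
          simpa using this
        rcases hz' with rfl | hz'
        · rcases lt_or_eq_of_le (le_of_not_gt hxy) with h | h
          · exact Or.inl h
          · exact Or.inr ⟨h, hpos y (List.mem_cons_self)⟩
        · exact hy z hz'

theorem foldl_insertBy_stable {α : Type} (key pos : α → Int) :
    ∀ (xs acc : List α), acc.Pairwise (Rst key pos) →
      xs.Pairwise (fun a b => pos a < pos b) →
      (∀ y ∈ acc, ∀ x ∈ xs, pos y < pos x) →
      (xs.foldl (fun acc x => PySem.List.insertBy (fun a b => decide (key b < key a)) x acc) acc).Pairwise (Rst key pos)
      ∧ (xs.foldl (fun acc x => PySem.List.insertBy (fun a b => decide (key b < key a)) x acc) acc).Perm (acc ++ xs) := by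
  intro xs
  induction xs with
  | nil => intro acc h _ _; exact ⟨h, by simp⟩
  | cons x xs ih =>
      intro acc hacc hxs hcross
      rcases List.pairwise_cons.mp hxs with ⟨hx, hxs'⟩
      have hperm := insertBy_perm (fun a b => decide (key b < key a)) x acc
      have hstep := insertBy_pairwise key pos x acc hacc (fun y hy => hcross y hy x (List.mem_cons_self))
      have hcross' : ∀ y ∈ PySem.List.insertBy (fun a b => decide (key b < key a)) x acc, ∀ z ∈ xs, pos y < pos z := by
        intro y hy z hz
        rcases List.mem_cons.mp (hperm.mem_iff.mp hy) with rfl | hy'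
        · exact hx z hz
        · exact hcross y hy' z (List.mem_cons_of_mem _ hz)
      rcases ih _ hstep hxs' hcross' with ⟨h1, h2⟩
      refine ⟨h1, h2.trans ?_⟩
      exact (hperm.append_right xs).trans List.perm_middle.symm

theorem sorted_rev_stable {α : Type} (key pos : α → Int) (xs ys : List α)
    (hx : xs.Pairwise (fun a b => pos a < pos b)) (hperm : ys.Perm xs)
    (hy : ys.Pairwise (Rst key pos)) : PySem.List.sorted xs key true = ys := by
  rw [PySem.List.sorted_rev_eq_foldl_insertBy]
  rcases foldl_insertBy_stable key pos xs [] (by simp) hx (by simp) with ⟨h1, h2⟩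
  refine List.Perm.eq_of_pairwise ?_ h1 hy (by simpa using h2.trans hperm.symm)
  intro a b _ _ hab hba
  exfalso
  rcases hab with h | ⟨h1', h2'⟩ <;> rcases hba with h' | ⟨h1'', h2''⟩ <;> omega

-- ---------- stage A1 : characterising musicCount ----------

theorem stepA_eq (d : PySem.Dict String Int) (g : String) (p : Int) :
    (let d' := if d.contains g then d else d.insert g 0
     d'.insert g (d'.getD g 0 + p)) = d.modify g 0 (· + p) := by
  by_cases h : d.contains g = true
  · simp [h, PySem.Dict.modify]
  · simp only [h, Bool.false_eq_true, if_false]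
    rw [PySem.Dict.getD_insert_self, PySem.Dict.insert_insert_self,
        PySem.Dict.modify, PySem.Dict.getD_of_not_contains _ _ (by simpa using h)]

theorem mcA_eq (genres : List String) (plays : List Int) :
    ((idxL genres).foldl (fun d i =>
        (if d.contains (gAt genres i) = true then d else d.insert (gAt genres i) 0).insert
          (gAt genres i)
          ((if d.contains (gAt genres i) = true then d else d.insert (gAt genres i) 0).getD
            (gAt genres i) 0 + pAt plays i)) PySem.Dict.empty)
    = (idxL genres).foldl (fun d i => d.modify (gAt genres i) 0 (· + pAt plays i)) PySem.Dict.empty := by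
  have : (fun (d : PySem.Dict String Int) (i : Int) =>
        (if d.contains (gAt genres i) = true then d else d.insert (gAt genres i) 0).insert
          (gAt genres i)
          ((if d.contains (gAt genres i) = true then d else d.insert (gAt genres i) 0).getD
            (gAt genres i) 0 + pAt plays i))
      = fun d i => d.modify (gAt genres i) 0 (· + pAt plays i) := by
    funext d i
    exact stepA_eq d (gAt genres i) (pAt plays i)
  rw [this]

theorem getD_modifySum (genres : List String) (plays : List Int) (g : String) :
    ∀ (l : List Int) (d : PySem.Dict String Int),
      (l.foldl (fun d i => d.modify (gAt genres i) 0 (· + pAt plays i)) d).getD g 0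
      = d.getD g 0 + ((l.filter (fun i => gAt genres i == g)).map (pAt plays)).sum := by
  intro l
  induction l with
  | nil => intro d; simp
  | cons i l ih =>
      intro d
      simp only [List.foldl_cons, List.filter_cons]
      rw [ih]
      by_cases h : gAt genres i = g
      · subst h
        rw [PySem.Dict.getD_modify]
        simp
        ring
      · have hb : (gAt genres i == g) = false := by simpa using h
        rw [PySem.Dict.getD_modify]
        simp [hb, Ne.symm h]

theorem mc_keys (genres : List String) (plays : List Int) :
    ((idxL genres).foldl (fun d i => d.modify (gAt genres i) 0 (· + pAt plays i)) PySem.Dict.empty).keys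
      = gde genres := by
  rw [PySem.Dict.keys_foldl_modify_key (idxL genres) (gAt genres) 0
        (fun _ i => (· + pAt plays i)) PySem.Dict.empty]
  rw [PySem.Dict.keys_empty, map_gAt_idxL, gde, PySem.List.dedup_eq_ofList]
  exact PySem.Set.update_empty genres

theorem mc_nodup (genres : List String) (plays : List Int) :
    ((idxL genres).foldl (fun d i => d.modify (gAt genres i) 0 (· + pAt plays i)) PySem.Dict.empty).keys.Nodup := by
  exact PySem.Dict.nodup_keys_foldl_modify_key (idxL genres) (gAt genres) 0
    (fun _ i => (· + pAt plays i)) PySem.Dict.empty PySem.Dict.nodup_keys_empty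

theorem mc_items (genres : List String) (plays : List Int) :
    ((idxL genres).foldl (fun d i => d.modify (gAt genres i) 0 (· + pAt plays i)) PySem.Dict.empty).items
      = itemsP genres plays := by
  rw [PySem.Dict.items_eq_map_keys _ (mc_nodup genres plays) 0, mc_keys genres plays]
  unfold itemsP
  refine List.map_congr_left ?_
  intro g _
  rw [getD_modifySum genres plays g (idxL genres) PySem.Dict.empty]
  simp [totP, PySem.Dict.getD_empty]


-- ---------- stage A2 : genres_sorted is the strict keyGP sort ----------

theorem gde_pairwise_idx (genres : List String) :
    (gde genres).Pairwise (fun a b => rnkP genres a < rnkP genres b) := by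
  rw [List.pairwise_iff_getElem]
  intro i j hi hj hij
  unfold rnkP gde at *
  rw [(PySem.List.nodup_dedup genres).idxOf_getElem i hi,
      (PySem.List.nodup_dedup genres).idxOf_getElem j hj]
  exact_mod_cast hij

theorem mem_fst_itemsP {genres : List String} {plays : List Int} {a : String × Int}
    (h : a ∈ itemsP genres plays) : a.1 ∈ gde genres ∧ a.2 = totP genres plays a.1 := by
  rcases List.mem_map.mp h with ⟨g, hg, rfl⟩
  exact ⟨hg, rfl⟩

theorem keyGP_inj_on (genres : List String) (plays : List Int) {g h : String}
    (hg : g ∈ gde genres) (hh : h ∈ gde genres)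
    (he : keyGP genres plays g = keyGP genres plays h) : g = h := by
  unfold keyGP at he
  have h2 : rnkP genres g = rnkP genres h := (Prod.mk.injEq _ _ _ _ ▸ (toLex_inj.mp he)).2
  unfold rnkP at h2
  have h3 : List.idxOf g (gde genres) = List.idxOf h (gde genres) := by exact_mod_cast h2
  have hgl := List.idxOf_lt_length_of_mem hg
  have hhl := List.idxOf_lt_length_of_mem hh
  calc g = (gde genres)[List.idxOf g (gde genres)] := (List.getElem_idxOf hgl).symm
    _ = (gde genres)[List.idxOf h (gde genres)] := by congr 1
    _ = h := List.getElem_idxOf hhl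

theorem nodup_fst_GS (genres : List String) (plays : List Int) :
    ((GS genres plays).map (fun x => x.1)).Nodup := by
  have hperm : ((GS genres plays).map (fun x => x.1)).Perm ((itemsP genres plays).map (fun x => x.1)) :=
    (PySem.List.sorted_perm _ _ _).map _
  rw [hperm.nodup_iff]
  have : (itemsP genres plays).map (fun x => x.1) = gde genres := by
    simp [itemsP, List.map_map, Function.comp_def]
  rw [this]
  exact PySem.List.nodup_dedup genres

theorem GS_pairwise (genres : List String) (plays : List Int) :
    (GS genres plays).Pairwise (fun a b => keyGP genres plays a.1 < keyGP genres plays b.1) := by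
  have hle := PySem.List.sorted_pairwise (itemsP genres plays) (fun x => keyGP genres plays x.1)
  have hne : (GS genres plays).Pairwise (fun a b => a.1 ≠ b.1) := by
    exact List.pairwise_map.mp (nodup_fst_GS genres plays)
  refine (hle.and hne).imp_of_mem ?_
  intro a b ha hb hab
  have ha' := mem_fst_itemsP ((PySem.List.mem_sorted _ _ _ _).mp ha)
  have hb' := mem_fst_itemsP ((PySem.List.mem_sorted _ _ _ _).mp hb)
  exact lt_of_le_of_ne hab.1 (fun heq => hab.2 (keyGP_inj_on genres plays ha'.1 hb'.1 heq))

theorem ordG_pairwise (genres : List String) (plays : List Int) :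
    (ordG genres plays).Pairwise (fun g h => keyGP genres plays g < keyGP genres plays h) := by
  unfold ordG
  exact List.pairwise_map.mpr (GS_pairwise genres plays)

theorem GS_eq (genres : List String) (plays : List Int) :
    PySem.List.sorted (itemsP genres plays) (fun x => x.2) true = GS genres plays := by
  apply sorted_rev_stable (fun x : String × Int => x.2) (fun x => rnkP genres x.1)
  · exact List.pairwise_map.mpr (gde_pairwise_idx genres)
  · exact PySem.List.sorted_perm _ _ _
  · refine (GS_pairwise genres plays).imp_of_mem ?_
    intro a b ha hb hlt
    have ha' := mem_fst_itemsP ((PySem.List.mem_sorted _ _ _ _).mp ha)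
    have hb' := mem_fst_itemsP ((PySem.List.mem_sorted _ _ _ _).mp hb)
    rcases Prod.Lex.lt_iff.mp hlt with h | ⟨h1, h2⟩
    · simp only [keyGP, ofLex_toLex] at h
      refine Or.inl ?_
      show b.2 < a.2
      rw [ha'.2, hb'.2]; omega
    · simp only [keyGP, ofLex_toLex] at h1 h2
      refine Or.inr ⟨?_, ?_⟩
      · show b.2 = a.2
        rw [ha'.2, hb'.2]; omega
      · exact h2


-- ---------- stage A3 : the music dict and A's answer ----------

theorem gAt_fold (genres : List String) (i : Int) : PySem.List.pyGetD genres i "" = gAt genres i := rfl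
theorem pAt_fold (plays : List Int) (i : Int) : PySem.List.pyGetD plays i 0 = pAt plays i := rfl
theorem idxL_fold (genres : List String) : PySem.List.pyRange 0 (genres.length : Int) = idxL genres := rfl

theorem mem_ordG {genres : List String} {plays : List Int} {g : String} :
    g ∈ ordG genres plays ↔ g ∈ gde genres := by
  unfold ordG GS
  rw [((PySem.List.sorted_perm (itemsP genres plays) (fun x => keyGP genres plays x.1) false).map (fun x => x.1)).mem_iff]
  simp [itemsP, List.map_map, Function.comp_def]

theorem set_update_of_mem {s xs : List String} (h : ∀ x ∈ xs, x ∈ s) :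
    PySem.Set.update s xs = s := by
  induction xs generalizing s with
  | nil => rfl
  | cons x xs ih =>
      have hx : PySem.Set.contains s x = true := by
        have := h x (List.mem_cons_self)
        simpa [PySem.Set.contains] using this
      show PySem.Set.update (PySem.Set.add s x) xs = s
      rw [PySem.Set.add, if_pos hx]
      exact ih (fun y hy => h y (List.mem_cons_of_mem _ hy))

theorem M0_items (genres : List String) (plays : List Int) :
    ((GS genres plays).foldl (fun d genre => d.insert genre.1 ([] : List (Int × Int))) PySem.Dict.empty).items
      = (GS genres plays).map (fun p => (p.1, ([] : List (Int × Int)))) := by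
  have := PySem.Dict.items_foldl_insert_fresh (GS genres plays) (fun p => p.1)
    (fun _ => ([] : List (Int × Int))) PySem.Dict.empty
    (fun a _ => PySem.Dict.contains_empty _) (nodup_fst_GS genres plays)
  simpa using this

theorem M0_keys (genres : List String) (plays : List Int) :
    ((GS genres plays).foldl (fun d genre => d.insert genre.1 ([] : List (Int × Int))) PySem.Dict.empty).keys
      = ordG genres plays := by
  show (((GS genres plays).foldl (fun d genre => d.insert genre.1 ([] : List (Int × Int))) PySem.Dict.empty).items.map (fun x => x.1))
      = ordG genres plays
  rw [M0_items]
  simp [ordG, List.map_map, Function.comp_def]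

theorem M0_nodup (genres : List String) (plays : List Int) :
    ((GS genres plays).foldl (fun d genre => d.insert genre.1 ([] : List (Int × Int))) PySem.Dict.empty).keys.Nodup := by
  rw [M0_keys]
  exact nodup_fst_GS genres plays

theorem M0_getD (genres : List String) (plays : List Int) {g : String}
    (hg : g ∈ ordG genres plays) :
    ((GS genres plays).foldl (fun d genre => d.insert genre.1 ([] : List (Int × Int))) PySem.Dict.empty).getD g [] = [] := by
  rcases List.mem_map.mp hg with ⟨p, hp, rfl⟩
  refine PySem.Dict.getD_of_mem_items _ ?_ (M0_nodup genres plays) []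
  rw [M0_items]
  exact List.mem_map.mpr ⟨p, hp, rfl⟩

theorem musicA_values (genres : List String) (plays : List Int) :
    ((idxL genres).foldl (fun (d : PySem.Dict String (List (Int × Int))) i => d.modify (gAt genres i) [] fun l => l ++ [(i, pAt plays i)])
        ((GS genres plays).foldl (fun d genre => d.insert genre.1 ([] : List (Int × Int))) PySem.Dict.empty)).values
      = (ordG genres plays).map (fun g => songsP genres plays g) := by
  have hdict : (idxL genres).foldl (fun (d : PySem.Dict String (List (Int × Int))) i => d.modify (gAt genres i) [] fun l => l ++ [(i, pAt plays i)])
        ((GS genres plays).foldl (fun d genre => d.insert genre.1 ([] : List (Int × Int))) PySem.Dict.empty)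
      = ((idxL genres).map (fun i => (gAt genres i, (i, pAt plays i)))).foldl
          (fun (d : PySem.Dict String (List (Int × Int))) p => d.modify p.1 [] fun l => l ++ [p.2])
          ((GS genres plays).foldl (fun d genre => d.insert genre.1 ([] : List (Int × Int))) PySem.Dict.empty) :=
    (List.foldl_map (f := fun i => (gAt genres i, (i, pAt plays i)))
      (g := fun (d : PySem.Dict String (List (Int × Int))) p => d.modify p.1 [] fun l => l ++ [p.2])).symm
  rw [hdict]
  have hkeys : (((idxL genres).map (fun i => (gAt genres i, (i, pAt plays i)))).foldl
          (fun d p => d.modify p.1 [] fun l => l ++ [p.2])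
          ((GS genres plays).foldl (fun d genre => d.insert genre.1 ([] : List (Int × Int))) PySem.Dict.empty)).keys
      = ordG genres plays := by
    rw [PySem.Dict.keys_foldl_modify_key ((idxL genres).map (fun i => (gAt genres i, (i, pAt plays i))))
          (fun (p : String × (Int × Int)) => p.1) []
          (fun (_ : PySem.Dict String (List (Int × Int))) (p : String × (Int × Int)) => fun l => l ++ [p.2]) _]
    rw [M0_keys, List.map_map]
    have : (idxL genres).map ((fun p => p.1) ∘ (fun i => (gAt genres i, (i, pAt plays i)))) = genres := by
      simpa [Function.comp_def] using map_gAt_idxL genres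
    rw [this]
    exact set_update_of_mem (fun x hx => mem_ordG.mpr ((PySem.List.mem_dedup genres x).mpr hx))
  have hnodup := PySem.Dict.nodup_keys_foldl_modify_key
      ((idxL genres).map (fun i => (gAt genres i, (i, pAt plays i))))
      (fun (p : String × (Int × Int)) => p.1) []
      (fun (_ : PySem.Dict String (List (Int × Int))) (p : String × (Int × Int)) => fun l => l ++ [p.2])
      _ (M0_nodup genres plays)
  rw [PySem.Dict.values_eq_map_keys _ hnodup [], hkeys]
  refine List.map_congr_left ?_
  intro g hg
  rw [PySem.Dict.getD_foldl_modify_append _ _ g, M0_getD genres plays hg]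
  rw [List.filter_map, List.map_map]
  show List.map (fun i => (i, pAt plays i)) ((idxL genres).filter (fun i => gAt genres i == g)) = _
  rfl

theorem thmA (genres : List String) (plays : List Int) :
    solution genres plays = RES genres plays := by
  unfold solution
  simp only [gAt_fold, pAt_fold, idxL_fold]
  rw [mcA_eq genres plays, mc_items genres plays, GS_eq genres plays, musicA_values genres plays]
  rw [List.flatMap_map]
  unfold RES sIdx keyS
  refine congrArg (fun f => List.flatMap f (ordG genres plays)) (funext (fun g => ?_))
  rw [PySem.List.slice_to _ (by norm_num : (0:Int) ≤ 2), List.map_take]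
  rfl



-- ---------- stage B1 : the total/rank fold ----------

def stepB (genres : List String) (plays : List Int) :
    PySem.Dict String Int × PySem.Dict String Int → Int → PySem.Dict String Int × PySem.Dict String Int :=
  fun st i =>
    ((if st.2.contains (gAt genres i) = true then st
      else (st.1.insert (gAt genres i) 0, st.2.insert (gAt genres i) (st.2.size : Int))).1.modify
        (gAt genres i) 0 fun x => x + pAt plays i,
     (if st.2.contains (gAt genres i) = true then st
      else (st.1.insert (gAt genres i) 0, st.2.insert (gAt genres i) (st.2.size : Int))).2)

theorem set_add_of_mem {s : List String} {x : String} (h : x ∈ s) : PySem.Set.add s x = s := by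
  rw [PySem.Set.add, if_pos (by simpa [PySem.Set.contains] using h)]

theorem set_add_of_not_mem {s : List String} {x : String} (h : x ∉ s) : PySem.Set.add s x = s ++ [x] := by
  rw [PySem.Set.add, if_neg (by simpa [PySem.Set.contains] using h)]

theorem Bloop (genres : List String) (plays : List Int) :
    ∀ (l : List Int) (t r : PySem.Dict String Int) (D : List String),
      D.Nodup → r.keys = D → t.keys = D →
      (∀ g ∈ D, r.getD g 0 = (List.idxOf g D : Int)) →
      ((l.foldl (stepB genres plays) (t, r)).2.keys = PySem.Set.update D (l.map (gAt genres)))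
      ∧ (PySem.Set.update D (l.map (gAt genres))).Nodup
      ∧ (∀ g ∈ PySem.Set.update D (l.map (gAt genres)),
          (l.foldl (stepB genres plays) (t, r)).2.getD g 0
            = (List.idxOf g (PySem.Set.update D (l.map (gAt genres))) : Int))
      ∧ (∀ g, (l.foldl (stepB genres plays) (t, r)).1.getD g 0
          = t.getD g 0 + ((l.filter (fun i => gAt genres i == g)).map (pAt plays)).sum) := by
  intro l
  induction l with
  | nil =>
      intro t r D hnd hrk htk hr
      exact ⟨hrk, hnd, fun g hg => hr g hg, fun g => by simp⟩
  | cons i l ih =>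
      intro t r D hnd hrk htk hr
      by_cases hc : r.contains (gAt genres i) = true
      · have hgD : gAt genres i ∈ D := by
          rw [← hrk]; exact (PySem.Dict.contains_iff_mem_keys r _).mp hc
        have hstep : stepB genres plays (t, r) i
            = (t.modify (gAt genres i) 0 (fun x => x + pAt plays i), r) := by
          simp [stepB, hc]
        have htk' : (t.modify (gAt genres i) 0 (fun x => x + pAt plays i)).keys = D := by
          rw [PySem.Dict.keys_modify,
              PySem.Dict.keys_insert_of_contains _ _ (by
                rw [PySem.Dict.contains_iff_mem_keys, htk]; exact hgD), htk]
        have hupd : PySem.Set.update D ((i :: l).map (gAt genres))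
            = PySem.Set.update D (l.map (gAt genres)) := by
          show PySem.Set.update (PySem.Set.add D (gAt genres i)) (l.map (gAt genres)) = _
          rw [set_add_of_mem hgD]
        rcases ih (t.modify (gAt genres i) 0 (fun x => x + pAt plays i)) r D hnd hrk htk' hr
          with ⟨h1, h2, h3, h4⟩
        refine ⟨?_, ?_, ?_, ?_⟩
        · rw [List.foldl_cons, hstep, hupd]; exact h1
        · rw [hupd]; exact h2
        · rw [hupd]; intro g hg; rw [List.foldl_cons, hstep]; exact h3 g hg
        · intro g
          rw [List.foldl_cons, hstep, h4 g, List.filter_cons]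
          by_cases he : gAt genres i = g
          · subst he
            rw [PySem.Dict.getD_modify]
            simp
            ring
          · have hb : (gAt genres i == g) = false := by simpa using he
            rw [PySem.Dict.getD_modify]
            simp [hb, Ne.symm he]
      · have hgD : gAt genres i ∉ D := by
          rw [← hrk]; intro hmem; exact hc ((PySem.Dict.contains_iff_mem_keys r _).mpr hmem)
        have hsize : r.size = D.length := by
          have : r.keys.length = D.length := by rw [hrk]
          simpa [PySem.Dict.keys, PySem.Dict.size] using this
        have hstep : stepB genres plays (t, r) i
            = ((t.insert (gAt genres i) 0).modify (gAt genres i) 0 (fun x => x + pAt plays i),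
               r.insert (gAt genres i) (D.length : Int)) := by
          simp [stepB, hc, hsize]
        have hndD : (D ++ [gAt genres i]).Nodup := by
          refine List.Nodup.append hnd (List.nodup_singleton _) ?_
          intro a ha hb
          rw [List.mem_singleton] at hb
          subst hb
          exact hgD ha
        have htc : t.contains (gAt genres i) = false := by
          rw [← Bool.not_eq_true]
          intro hct
          exact hgD (htk ▸ (PySem.Dict.contains_iff_mem_keys t _).mp hct)
        have hrk' : (r.insert (gAt genres i) (D.length : Int)).keys = D ++ [gAt genres i] := by
          rw [PySem.Dict.keys_insert_of_not_contains r _ (by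
            rw [← Bool.not_eq_true, PySem.Dict.contains_iff_mem_keys, hrk]; exact hgD), hrk]
        have htk' : ((t.insert (gAt genres i) 0).modify (gAt genres i) 0 (fun x => x + pAt plays i)).keys
            = D ++ [gAt genres i] := by
          rw [PySem.Dict.keys_modify,
              PySem.Dict.keys_insert_of_contains _ _ (PySem.Dict.contains_insert_self t _ _),
              PySem.Dict.keys_insert_of_not_contains t _ htc, htk]
        have hr' : ∀ g ∈ D ++ [gAt genres i],
            (r.insert (gAt genres i) (D.length : Int)).getD g 0
              = (List.idxOf g (D ++ [gAt genres i]) : Int) := by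
          intro g hg
          rcases List.mem_append.mp hg with hg | hg
          · have hne : g ≠ gAt genres i := fun he => hgD (he ▸ hg)
            rw [PySem.Dict.getD_insert, if_neg hne, hr g hg, List.idxOf_append, if_pos hg]
          · have he : g = gAt genres i := by simpa using hg
            subst he
            rw [PySem.Dict.getD_insert_self, List.idxOf_append, if_neg hgD]
            simp
        have hupd : PySem.Set.update D ((i :: l).map (gAt genres))
            = PySem.Set.update (D ++ [gAt genres i]) (l.map (gAt genres)) := by
          show PySem.Set.update (PySem.Set.add D (gAt genres i)) (l.map (gAt genres)) = _
          rw [set_add_of_not_mem hgD]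
        rcases ih _ _ (D ++ [gAt genres i]) hndD hrk' htk' hr' with ⟨h1, h2, h3, h4⟩
        refine ⟨?_, ?_, ?_, ?_⟩
        · rw [List.foldl_cons, hstep, hupd]; exact h1
        · rw [hupd]; exact h2
        · rw [hupd]; intro g hg; rw [List.foldl_cons, hstep]; exact h3 g hg
        · intro g
          rw [List.foldl_cons, hstep, h4 g, List.filter_cons]
          have hins : (t.insert (gAt genres i) 0).getD (gAt genres i) 0 = t.getD (gAt genres i) 0 := by
            rw [PySem.Dict.getD_insert_self, PySem.Dict.getD_of_not_contains t _ htc]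
          by_cases he : gAt genres i = g
          · subst he
            rw [PySem.Dict.getD_modify]
            simp [hins]
            ring
          · have hb : (gAt genres i == g) = false := by simpa using he
            rw [PySem.Dict.getD_modify]
            simp [hb, PySem.Dict.getD_insert, Ne.symm he]


-- ---------- stage B2 : the global sort order ----------

theorem nodup_idxL (genres : List String) : (idxL genres).Nodup := by
  rw [idxL, PySem.List.pyRange_zero_natCast]
  exact (List.nodup_range).map (fun a b => by exact_mod_cast id)

theorem mem_idxL_gAt {genres : List String} {i : Int} (h : i ∈ idxL genres) :
    gAt genres i ∈ genres := by
  rw [idxL, PySem.List.pyRange_zero_natCast] at h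
  rcases List.mem_map.mp h with ⟨k, hk, rfl⟩
  rw [gAt, PySem.List.pyGetD_natCast, List.getD_eq_getElem _ _ (List.mem_range.mp hk)]
  exact List.getElem_mem _

theorem mem_songsP {genres : List String} {plays : List Int} {g : String} {x : Int × Int} :
    x ∈ songsP genres plays g ↔
      (x.1 ∈ idxL genres ∧ gAt genres x.1 = g) ∧ x = (x.1, pAt plays x.1) := by
  unfold songsP
  constructor
  · intro hx
    rcases List.mem_map.mp hx with ⟨i, hi, rfl⟩
    rcases List.mem_filter.mp hi with ⟨hi1, hi2⟩
    exact ⟨⟨hi1, by simpa using hi2⟩, rfl⟩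
  · rintro ⟨⟨h1, h2⟩, hx⟩
    rw [hx]
    exact List.mem_map.mpr ⟨x.1, List.mem_filter.mpr ⟨h1, by simpa using h2⟩, rfl⟩

theorem nodup_songsP (genres : List String) (plays : List Int) (g : String) :
    (songsP genres plays g).Nodup := by
  refine ((nodup_idxL genres).filter _).map ?_
  intro a b h
  exact congrArg Prod.fst h

theorem keyS_inj : Function.Injective keyS := by
  intro a b h
  unfold keyS at h
  have h2 := toLex_inj.mp h
  have h3 := (Prod.mk.injEq _ _ _ _).mp h2
  refine Prod.ext ?_ ?_
  · exact h3.2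
  · omega

theorem sorted_songs_pairwise (genres : List String) (plays : List Int) (g : String) :
    (PySem.List.sorted (songsP genres plays g) keyS).Pairwise (fun a b => keyS a < keyS b) := by
  have hle := PySem.List.sorted_pairwise (songsP genres plays g) keyS
  have hnd : (PySem.List.sorted (songsP genres plays g) keyS).Nodup :=
    (PySem.List.sorted_perm _ _ _).nodup_iff.mpr (nodup_songsP genres plays g)
  refine ((hle.and hnd).imp ?_)
  intro a b hab
  exact lt_of_le_of_ne hab.1 (fun he => hab.2 (keyS_inj he))

theorem mem_sIdx {genres : List String} {plays : List Int} {g : String} {i : Int}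
    (h : i ∈ sIdx genres plays g) : i ∈ idxL genres ∧ gAt genres i = g := by
  rcases List.mem_map.mp h with ⟨x, hx, rfl⟩
  rcases mem_songsP.mp ((PySem.List.mem_sorted _ _ _ _).mp hx) with ⟨⟨h1, h2⟩, _⟩
  exact ⟨h1, h2⟩

theorem sIdx_perm_filter (genres : List String) (plays : List Int) (g : String) :
    (sIdx genres plays g).Perm ((idxL genres).filter (fun i => gAt genres i == g)) := by
  unfold sIdx
  have h1 : ((PySem.List.sorted (songsP genres plays g) keyS).map (fun x => x.1)).Perm
      ((songsP genres plays g).map (fun x => x.1)) := (PySem.List.sorted_perm _ _ _).map _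
  refine h1.trans ?_
  unfold songsP
  rw [List.map_map]
  simp [Function.comp_def]

theorem partition_perm (genres : List String) :
    ∀ (H : List String) (l : List Int), H.Nodup → (∀ i ∈ l, gAt genres i ∈ H) →
      (H.flatMap (fun g => l.filter (fun i => gAt genres i == g))).Perm l := by
  intro H
  induction H with
  | nil =>
      intro l _ hcov
      have : l = [] := List.eq_nil_iff_forall_not_mem.mpr (fun i hi => by simpa using hcov i hi)
      simp [this]
  | cons g H ih =>
      intro l hnd hcov
      rcases List.nodup_cons.mp hnd with ⟨hg, hndH⟩
      rw [List.flatMap_cons]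
      have hcong : ∀ g' ∈ H, l.filter (fun i => gAt genres i == g')
          = (l.filter (fun i => !(gAt genres i == g))).filter (fun i => gAt genres i == g') := by
        intro g' hg'
        rw [List.filter_filter]
        refine (List.filter_congr ?_)
        intro i _
        by_cases he : gAt genres i = g'
        · have hgg : g' ≠ g := fun hgg => hg (hgg ▸ hg')
          simp [he]
          exact hgg
        · simp [he]
      rw [List.flatMap_congr hcong]
      have hcov' : ∀ i ∈ l.filter (fun i => !(gAt genres i == g)), gAt genres i ∈ H := by
        intro i hi
        rcases List.mem_filter.mp hi with ⟨hi1, hi2⟩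
        rcases List.mem_cons.mp (hcov i hi1) with h | h
        · exact absurd h (by simpa using hi2)
        · exact h
      refine (List.Perm.append_left _ (ih _ hndH hcov')).trans ?_
      exact List.filter_append_perm _ l

-- ---------- stage B3 : the counting pass ----------

def stepC (genres : List String) : PySem.Dict String Int × List Int → Int → PySem.Dict String Int × List Int :=
  fun st i =>
    if st.1.getD (gAt genres i) 0 < 2 then
      (st.1.insert (gAt genres i) (st.1.getD (gAt genres i) 0 + 1), st.2 ++ [i])
    else st

theorem innerC (genres : List String) (g : String) :
    ∀ (bs : List Int) (e : PySem.Dict String Int) (ans : List Int) (c : Int),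
      (∀ i ∈ bs, gAt genres i = g) → e.getD g 0 = c → 0 ≤ c →
      (bs.foldl (stepC genres) (e, ans)).2 = ans ++ bs.take (2 - c).toNat
      ∧ ∀ g', g' ≠ g → (bs.foldl (stepC genres) (e, ans)).1.contains g' = e.contains g' := by
  intro bs
  induction bs with
  | nil => intro e ans c _ _ _; exact ⟨by simp, fun _ _ => rfl⟩
  | cons i bs ih =>
      intro e ans c hbs hc h0
      have hgi : gAt genres i = g := hbs i (List.mem_cons_self)
      by_cases hlt : e.getD (gAt genres i) 0 < 2
      · have hstep : stepC genres (e, ans) i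
            = (e.insert (gAt genres i) (e.getD (gAt genres i) 0 + 1), ans ++ [i]) := by
          simp [stepC, hlt]
        have hc' : (e.insert (gAt genres i) (e.getD (gAt genres i) 0 + 1)).getD g 0 = c + 1 := by
          rw [hgi, PySem.Dict.getD_insert_self, hc]
        rcases ih (e.insert (gAt genres i) (e.getD (gAt genres i) 0 + 1)) (ans ++ [i]) (c + 1)
            (fun j hj => hbs j (List.mem_cons_of_mem _ hj)) hc' (by omega) with ⟨h1, h2⟩
        refine ⟨?_, ?_⟩
        · rw [List.foldl_cons, hstep, h1]
          have hcc : c < 2 := by rw [hgi, hc] at hlt; exact hlt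
          have htn : (2 - c).toNat = (2 - (c + 1)).toNat + 1 := by omega
          rw [htn, List.take_succ_cons]
          simp
        · intro g' hg'
          rw [List.foldl_cons, hstep, h2 g' hg', PySem.Dict.contains_insert]
          have : (g' == gAt genres i) = false := by simpa [hgi] using hg'
          simp [this]
      · have hstep : stepC genres (e, ans) i = (e, ans) := by
          simp [stepC, hlt]
        have hcc : ¬ c < 2 := by rw [hgi, hc] at hlt; exact hlt
        rcases ih e ans c (fun j hj => hbs j (List.mem_cons_of_mem _ hj)) hc h0 with ⟨h1, h2⟩
        refine ⟨?_, ?_⟩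
        swap
        · intro g' hg'
          rw [List.foldl_cons, hstep]
          exact h2 g' hg'
        rw [List.foldl_cons, hstep, h1]
        have htn : (2 - c).toNat = 0 := by omega
        rw [htn]
        simp

theorem countC (genres : List String) (plays : List Int) :
    ∀ (gs : List String) (e : PySem.Dict String Int) (ans : List Int),
      gs.Nodup → (∀ g ∈ gs, e.contains g = false) →
      ((gs.flatMap (fun g => sIdx genres plays g)).foldl (stepC genres) (e, ans)).2
        = ans ++ gs.flatMap (fun g => (sIdx genres plays g).take 2) := by
  intro gs
  induction gs with
  | nil => intro e ans _ _; simp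
  | cons g gs ih =>
      intro e ans hnd hfree
      rcases List.nodup_cons.mp hnd with ⟨hg, hndg⟩
      rw [List.flatMap_cons, List.foldl_append]
      have hc0 : e.getD g 0 = 0 :=
        PySem.Dict.getD_of_not_contains e 0 (hfree g (List.mem_cons_self))
      rcases innerC genres g (sIdx genres plays g) e ans 0
          (fun i hi => (mem_sIdx hi).2) hc0 (by omega) with ⟨h1, h2⟩
      have h1' : ((sIdx genres plays g).foldl (stepC genres) (e, ans)).2
          = ans ++ (sIdx genres plays g).take 2 := by simpa using h1
      have hres : ((sIdx genres plays g).foldl (stepC genres) (e, ans))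
          = (((sIdx genres plays g).foldl (stepC genres) (e, ans)).1,
             ans ++ (sIdx genres plays g).take 2) := by
        rw [← h1']
      rw [hres, ih _ _ hndg ?_]
      · rw [List.flatMap_cons, List.append_assoc]
      · intro g' hg'
        have hne : g' ≠ g := fun he => hg (he ▸ hg')
        rw [h2 g' hne]
        exact hfree g' (List.mem_cons_of_mem _ hg')

theorem thmB (genres : List String) (plays : List Int) :
    solution_alt genres plays = RES genres plays := by
  unfold solution_alt
  simp only [gAt_fold, pAt_fold, idxL_fold]
  rw [show (fun (st : PySem.Dict String Int × PySem.Dict String Int) i =>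
        ((if st.2.contains (gAt genres i) = true then st
          else (st.1.insert (gAt genres i) 0, st.2.insert (gAt genres i) (st.2.size : Int))).1.modify
            (gAt genres i) 0 fun x => x + pAt plays i,
         (if st.2.contains (gAt genres i) = true then st
          else (st.1.insert (gAt genres i) 0, st.2.insert (gAt genres i) (st.2.size : Int))).2))
      = stepB genres plays from rfl]
  rw [show (fun (st : PySem.Dict String Int × List Int) i =>
        if st.1.getD (gAt genres i) 0 < 2 then
          (st.1.insert (gAt genres i) (st.1.getD (gAt genres i) 0 + 1), st.2 ++ [i])
        else st) = stepC genres from rfl]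
  set stf := List.foldl (stepB genres plays) (PySem.Dict.empty, PySem.Dict.empty) (idxL genres) with hstf
  obtain ⟨-, -, hrk, htot⟩ := Bloop genres plays (idxL genres) PySem.Dict.empty PySem.Dict.empty []
    List.nodup_nil PySem.Dict.keys_empty PySem.Dict.keys_empty (by intro g hg; cases hg)
  rw [← hstf] at hrk htot
  rw [map_gAt_idxL] at hrk
  have hupd : PySem.Set.update [] genres = gde genres := by
    rw [gde, PySem.List.dedup_eq_ofList]
    exact PySem.Set.update_empty genres
  rw [hupd] at hrk
  have htot' : ∀ g, stf.1.getD g 0 = totP genres plays g := by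
    intro g
    rw [htot g, PySem.Dict.getD_empty, totP]
    omega
  have hordnd : (ordG genres plays).Nodup := by
    rw [ordG]; exact nodup_fst_GS genres plays
  have horder : PySem.List.sorted (idxL genres) (fun i =>
      toLex (-(stf.1.getD (gAt genres i) 0),
        toLex (stf.2.getD (gAt genres i) 0, toLex (-(pAt plays i), i))))
      = (ordG genres plays).flatMap (fun g => sIdx genres plays g) := by
    apply PySem.List.sorted_eq_of_perm_of_pairwise_lt
    · refine (List.Perm.flatMap (List.Perm.refl _)
        (fun g _ => sIdx_perm_filter genres plays g)).trans ?_
      refine partition_perm genres (ordG genres plays) (idxL genres) hordnd ?_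
      intro i hi
      exact mem_ordG.mpr ((PySem.List.mem_dedup genres _).mpr (mem_idxL_gAt hi))
    · refine List.pairwise_flatMap.mpr ⟨?_, ?_⟩
      · -- within one genre block
        intro g hgord
        have hgde : g ∈ gde genres := mem_ordG.mp hgord
        refine List.pairwise_map.mpr ((sorted_songs_pairwise genres plays g).imp_of_mem ?_)
        intro a b ha hb hlt
        rcases mem_songsP.mp ((PySem.List.mem_sorted _ _ _ _).mp ha) with ⟨⟨hai, hag⟩, haeq⟩
        rcases mem_songsP.mp ((PySem.List.mem_sorted _ _ _ _).mp hb) with ⟨⟨hbi, hbg⟩, hbeq⟩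
        have ha2 : a.2 = pAt plays a.1 := congrArg Prod.snd haeq
        have hb2 : b.2 = pAt plays b.1 := congrArg Prod.snd hbeq
        unfold keyS at hlt
        rw [ha2, hb2] at hlt
        rw [hag, hbg, htot' g, hrk g hgde]
        refine Prod.Lex.lt_iff.mpr (Or.inr ⟨by simp, ?_⟩)
        simp only [ofLex_toLex]
        exact Prod.Lex.lt_iff.mpr (Or.inr ⟨by simp, by simpa using hlt⟩)
      · -- across genre blocks
        refine (ordG_pairwise genres plays).imp_of_mem ?_
        intro g h hgord hhord hlt x hx y hy
        have hgde : g ∈ gde genres := mem_ordG.mp hgord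
        have hhde : h ∈ gde genres := mem_ordG.mp hhord
        rcases mem_sIdx hx with ⟨hxi, hxg⟩
        rcases mem_sIdx hy with ⟨hyi, hyg⟩
        rw [hxg, hyg, htot' g, htot' h, hrk g hgde, hrk h hhde]
        unfold keyGP at hlt
        rcases Prod.Lex.lt_iff.mp hlt with hl | ⟨hl1, hl2⟩
        · simp only [ofLex_toLex] at hl
          refine Prod.Lex.lt_iff.mpr (Or.inl ?_)
          simpa using hl
        · simp only [ofLex_toLex] at hl1 hl2
          refine Prod.Lex.lt_iff.mpr (Or.inr ⟨by simpa using hl1, ?_⟩)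
          simp only [ofLex_toLex]
          refine Prod.Lex.lt_iff.mpr (Or.inl ?_)
          simpa [rnkP] using hl2
  rw [horder]
  rw [countC genres plays (ordG genres plays) PySem.Dict.empty [] hordnd
      (fun g _ => PySem.Dict.contains_empty g)]
  simp [RES]

-- ===== VERDICT (by name: the statement is the Claim_ definition above) =====
theorem solution_spec : Claim_equal_solution := by
  intro genres plays _ _
  unfold Spec_solution
  rw [thmA, thmB]
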